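-- pv_equiv track=rewrite | github.com/sswhan6432-del/SSH_Task | llm_router.py | _strip_router_boilerplate
-- ===== SOURCE A (Python) =====
-- from typing import List, Tuple, Dict, Optional
--
-- def _strip_router_boilerplate(s: str) -> str:
--     lines = s.splitlines()
--     out: List[str] = []
--     for line in lines:
--         raw = line.strip()
--
--         # Drop common pasted headers
--         if raw.startswith("Task ") and raw.endswith(":"):
--             continue
--         if raw.startswith("Ticket ") and raw.endswith(":"):
--             continue
--
--         # If a change-log stub starts, drop everything after it
--         if raw.startswith("Change log stub"):
--             break
--
--         # Drop common guardrail boilerplate lines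
--         if raw.startswith("Implement minimal fix"):
--             continue
--         if raw.startswith("IMPLEMENT:") or raw.startswith("Flow:"):
--             continue
--         if raw in {"STOP", "Stop", "Stop."}:
--             continue
--
--         # Drop stub lines if present
--         if raw.startswith("## YYYY-MM-DD"):
--             continue
--         if raw.startswith("- What changed") or raw.startswith("- Files") or raw.startswith("- Notes"):
--             continue
--
--         out.append(line)
--
--     return "\n".join(out).strip()
-- ===== SOURCE B (Python) =====
-- def _noise(raw: str) -> bool:
--     return ((raw.startswith("Task ") and raw.endswith(":"))
--             or (raw.startswith("Ticket ") and raw.endswith(":"))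
--             or raw.startswith("Implement minimal fix")
--             or raw.startswith("IMPLEMENT:")
--             or raw.startswith("Flow:")
--             or raw.startswith("## YYYY-MM-DD")
--             or raw.startswith("- What changed")
--             or raw.startswith("- Files")
--             or raw.startswith("- Notes")
--             or raw in ("STOP", "Stop", "Stop."))
--
-- def _strip_router_boilerplate(s: str) -> str:
--     # Walk the lines back-to-front; a change-log stub line resets the accumulator,
--     # so the leftmost stub cancels itself and everything after it.
--     kept = []
--     for line in reversed(s.splitlines()):
--         raw = line.strip()
--         if raw.startswith("Change log stub"):
--             kept.clear()
--         elif not _noise(raw):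
--             kept.append(line)
--     kept.reverse()
--     return "\n".join(kept).strip()
-- ===== Notes on version B (the rewrite author's own statement) =====
-- stated objective: alternative
-- what changed: B traverses the line list back-to-front with an accumulator that is reset (cleared) at every change-log stub line, so the leftmost stub cancels everything after it, replacing A's forward loop with break and per-line continues.
import Mathlib
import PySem

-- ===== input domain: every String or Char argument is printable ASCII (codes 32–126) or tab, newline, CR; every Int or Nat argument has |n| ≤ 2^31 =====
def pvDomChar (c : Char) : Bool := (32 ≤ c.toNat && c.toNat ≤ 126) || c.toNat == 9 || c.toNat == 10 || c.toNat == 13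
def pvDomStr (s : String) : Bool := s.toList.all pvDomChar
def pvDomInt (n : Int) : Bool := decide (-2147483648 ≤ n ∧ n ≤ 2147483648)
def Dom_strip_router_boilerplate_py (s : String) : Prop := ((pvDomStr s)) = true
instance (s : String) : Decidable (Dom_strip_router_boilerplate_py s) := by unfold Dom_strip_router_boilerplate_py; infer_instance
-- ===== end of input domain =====

-- B walks the lines back-to-front with an accumulator that is reset at every change-log
-- stub line, instead of A's forward loop with break/continues (objective: alternative;
-- same return value).

-- ===== PORT A =====
-- A's for-loop with break/continue, as structural recursion over the line list.
-- The 3-element set membership `raw in {"STOP","Stop","Stop."}` is ported as the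
-- three equality tests (exact for a literal set of distinct strings).
def pvAGo : List String → List String
  | [] => []
  | line :: rest =>
    let raw := PySem.Str.strip line
    if PySem.Str.startswith raw "Task " && PySem.Str.endswith raw ":" then pvAGo rest
    else if PySem.Str.startswith raw "Ticket " && PySem.Str.endswith raw ":" then pvAGo rest
    else if PySem.Str.startswith raw "Change log stub" then []
    else if PySem.Str.startswith raw "Implement minimal fix" then pvAGo rest
    else if PySem.Str.startswith raw "IMPLEMENT:" || PySem.Str.startswith raw "Flow:" then pvAGo rest
    else if raw == "STOP" || raw == "Stop" || raw == "Stop." then pvAGo rest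
    else if PySem.Str.startswith raw "## YYYY-MM-DD" then pvAGo rest
    else if PySem.Str.startswith raw "- What changed" || PySem.Str.startswith raw "- Files" || PySem.Str.startswith raw "- Notes" then pvAGo rest
    else line :: pvAGo rest

def strip_router_boilerplate_py (s : String) : String :=
  PySem.Str.strip (PySem.Str.join "\n" (pvAGo (PySem.Str.splitlines s)))

-- ===== PORT B =====
-- Source B's `_noise` predicate: one flat or-chain; the 3-tuple membership is the three
-- equality tests (exact for distinct literals).
def pvIsNoise (raw : String) : Bool :=
  (PySem.Str.startswith raw "Task " && PySem.Str.endswith raw ":")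
  || (PySem.Str.startswith raw "Ticket " && PySem.Str.endswith raw ":")
  || PySem.Str.startswith raw "Implement minimal fix"
  || PySem.Str.startswith raw "IMPLEMENT:"
  || PySem.Str.startswith raw "Flow:"
  || PySem.Str.startswith raw "## YYYY-MM-DD"
  || PySem.Str.startswith raw "- What changed"
  || PySem.Str.startswith raw "- Files"
  || PySem.Str.startswith raw "- Notes"
  || (raw == "STOP" || raw == "Stop" || raw == "Stop.")

-- one iteration of Source B's backward loop: clear on a stub line, skip noise, else append
def pvBStep (acc : List String) (line : String) : List String :=
  let raw := PySem.Str.strip line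
  if PySem.Str.startswith raw "Change log stub" then []
  else if pvIsNoise raw then acc
  else acc ++ [line]

def strip_router_boilerplate_py_alt (s : String) : String :=
  PySem.Str.strip (PySem.Str.join "\n"
    ((((PySem.Str.splitlines s).reverse).foldl pvBStep []).reverse))

-- ===== PRECONDITION & SPEC =====
def Spec_strip_router_boilerplate_py (s : String) (out : String) : Prop := out = strip_router_boilerplate_py_alt s
instance (s : String) (out : String) : Decidable (Spec_strip_router_boilerplate_py s out) := by unfold Spec_strip_router_boilerplate_py; infer_instance

-- ===== CLAIM =====
def Claim_equal_strip_router_boilerplate_py : Prop := ∀ (s : String), Dom_strip_router_boilerplate_py s → Spec_strip_router_boilerplate_py s (strip_router_boilerplate_py s)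

-- ===== LEMMAS AND PROOFS =====

-- Two prefixes of the same string are comparable; used to show a stub line never
-- matches the "Task "/"Ticket " tests, so A's break may be hoisted before them.
theorem pv_no_stub (raw pre stub : List Char)
    (h : PySem.Chars.startswith raw pre = true)
    (hstub : PySem.Chars.startswith raw stub = true)
    (h1 : ¬ pre <+: stub) (h2 : ¬ stub <+: pre) : False := by
  rw [PySem.Chars.startswith_iff] at h hstub
  rcases List.prefix_or_prefix_of_prefix h hstub with h3 | h3
  · exact h1 h3
  · exact h2 h3

-- A's loop = cut at the first stub line, then filter by the bundled noise predicate.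
theorem pvGo_eq (ls : List String) :
    pvAGo ls =
      (ls.takeWhile (fun ln => !(PySem.Str.startswith (PySem.Str.strip ln) "Change log stub"))).filter
        (fun ln => !(pvIsNoise (PySem.Str.strip ln))) := by
  induction ls with
  | nil => rfl
  | cons line rest ih =>
    cases h1 : PySem.Str.startswith (PySem.Str.strip line) "Change log stub" with
    | true =>
      have hT : PySem.Str.startswith (PySem.Str.strip line) "Task " = false := by
        cases h : PySem.Str.startswith (PySem.Str.strip line) "Task " with
        | false => rfl
        | true =>
          exact absurd (pv_no_stub _ _ _ (by simpa using h) (by simpa using h1)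
            (by decide) (by decide)) not_false
      have hK : PySem.Str.startswith (PySem.Str.strip line) "Ticket " = false := by
        cases h : PySem.Str.startswith (PySem.Str.strip line) "Ticket " with
        | false => rfl
        | true =>
          exact absurd (pv_no_stub _ _ _ (by simpa using h) (by simpa using h1)
            (by decide) (by decide)) not_false
      simp only [pvAGo, pvIsNoise, List.takeWhile_cons, List.filter_cons, List.filter_nil, ih, *, Bool.false_and, Bool.and_false, Bool.true_and, Bool.and_true, Bool.false_or, Bool.or_false, Bool.true_or, Bool.or_true, Bool.not_true, Bool.not_false, Bool.false_eq_true, eq_self_iff_true, if_true, if_false]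
    | false =>
      cases h2 : PySem.Str.startswith (PySem.Str.strip line) "Task " && PySem.Str.endswith (PySem.Str.strip line) ":" with
      | true =>
        simp only [pvAGo, pvIsNoise, List.takeWhile_cons, List.filter_cons, List.filter_nil, ih, *, Bool.false_and, Bool.and_false, Bool.true_and, Bool.and_true, Bool.false_or, Bool.or_false, Bool.true_or, Bool.or_true, Bool.not_true, Bool.not_false, Bool.false_eq_true, eq_self_iff_true, if_true, if_false]
      | false =>
        cases h3 : PySem.Str.startswith (PySem.Str.strip line) "Ticket " && PySem.Str.endswith (PySem.Str.strip line) ":" with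
        | true =>
          simp only [pvAGo, pvIsNoise, List.takeWhile_cons, List.filter_cons, List.filter_nil, ih, *, Bool.false_and, Bool.and_false, Bool.true_and, Bool.and_true, Bool.false_or, Bool.or_false, Bool.true_or, Bool.or_true, Bool.not_true, Bool.not_false, Bool.false_eq_true, eq_self_iff_true, if_true, if_false]
        | false =>
          cases h4 : PySem.Str.startswith (PySem.Str.strip line) "Implement minimal fix" with
          | true =>
            simp only [pvAGo, pvIsNoise, List.takeWhile_cons, List.filter_cons, List.filter_nil, ih, *, Bool.false_and, Bool.and_false, Bool.true_and, Bool.and_true, Bool.false_or, Bool.or_false, Bool.true_or, Bool.or_true, Bool.not_true, Bool.not_false, Bool.false_eq_true, eq_self_iff_true, if_true, if_false]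
          | false =>
            cases h5 : PySem.Str.startswith (PySem.Str.strip line) "IMPLEMENT:" with
            | true =>
              simp only [pvAGo, pvIsNoise, List.takeWhile_cons, List.filter_cons, List.filter_nil, ih, *, Bool.false_and, Bool.and_false, Bool.true_and, Bool.and_true, Bool.false_or, Bool.or_false, Bool.true_or, Bool.or_true, Bool.not_true, Bool.not_false, Bool.false_eq_true, eq_self_iff_true, if_true, if_false]
            | false =>
              cases h6 : PySem.Str.startswith (PySem.Str.strip line) "Flow:" with
              | true =>
                simp only [pvAGo, pvIsNoise, List.takeWhile_cons, List.filter_cons, List.filter_nil, ih, *, Bool.false_and, Bool.and_false, Bool.true_and, Bool.and_true, Bool.false_or, Bool.or_false, Bool.true_or, Bool.or_true, Bool.not_true, Bool.not_false, Bool.false_eq_true, eq_self_iff_true, if_true, if_false]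
              | false =>
                cases h7 : PySem.Str.strip line == "STOP" with
                | true =>
                  simp only [pvAGo, pvIsNoise, List.takeWhile_cons, List.filter_cons, List.filter_nil, ih, *, Bool.false_and, Bool.and_false, Bool.true_and, Bool.and_true, Bool.false_or, Bool.or_false, Bool.true_or, Bool.or_true, Bool.not_true, Bool.not_false, Bool.false_eq_true, eq_self_iff_true, if_true, if_false]
                | false =>
                  cases h8 : PySem.Str.strip line == "Stop" with
                  | true =>
                    simp only [pvAGo, pvIsNoise, List.takeWhile_cons, List.filter_cons, List.filter_nil, ih, *, Bool.false_and, Bool.and_false, Bool.true_and, Bool.and_true, Bool.false_or, Bool.or_false, Bool.true_or, Bool.or_true, Bool.not_true, Bool.not_false, Bool.false_eq_true, eq_self_iff_true, if_true, if_false]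
                  | false =>
                    cases h9 : PySem.Str.strip line == "Stop." with
                    | true =>
                      simp only [pvAGo, pvIsNoise, List.takeWhile_cons, List.filter_cons, List.filter_nil, ih, *, Bool.false_and, Bool.and_false, Bool.true_and, Bool.and_true, Bool.false_or, Bool.or_false, Bool.true_or, Bool.or_true, Bool.not_true, Bool.not_false, Bool.false_eq_true, eq_self_iff_true, if_true, if_false]
                    | false =>
                      cases h10 : PySem.Str.startswith (PySem.Str.strip line) "## YYYY-MM-DD" with
                      | true =>
                        simp only [pvAGo, pvIsNoise, List.takeWhile_cons, List.filter_cons, List.filter_nil, ih, *, Bool.false_and, Bool.and_false, Bool.true_and, Bool.and_true, Bool.false_or, Bool.or_false, Bool.true_or, Bool.or_true, Bool.not_true, Bool.not_false, Bool.false_eq_true, eq_self_iff_true, if_true, if_false]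
                      | false =>
                        cases h11 : PySem.Str.startswith (PySem.Str.strip line) "- What changed" with
                        | true =>
                          simp only [pvAGo, pvIsNoise, List.takeWhile_cons, List.filter_cons, List.filter_nil, ih, *, Bool.false_and, Bool.and_false, Bool.true_and, Bool.and_true, Bool.false_or, Bool.or_false, Bool.true_or, Bool.or_true, Bool.not_true, Bool.not_false, Bool.false_eq_true, eq_self_iff_true, if_true, if_false]
                        | false =>
                          cases h12 : PySem.Str.startswith (PySem.Str.strip line) "- Files" with
                          | true =>
                            simp only [pvAGo, pvIsNoise, List.takeWhile_cons, List.filter_cons, List.filter_nil, ih, *, Bool.false_and, Bool.and_false, Bool.true_and, Bool.and_true, Bool.false_or, Bool.or_false, Bool.true_or, Bool.or_true, Bool.not_true, Bool.not_false, Bool.false_eq_true, eq_self_iff_true, if_true, if_false]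
                          | false =>
                            cases h13 : PySem.Str.startswith (PySem.Str.strip line) "- Notes" with
                            | true =>
                              simp only [pvAGo, pvIsNoise, List.takeWhile_cons, List.filter_cons, List.filter_nil, ih, *, Bool.false_and, Bool.and_false, Bool.true_and, Bool.and_true, Bool.false_or, Bool.or_false, Bool.true_or, Bool.or_true, Bool.not_true, Bool.not_false, Bool.false_eq_true, eq_self_iff_true, if_true, if_false]
                            | false =>
                              simp only [pvAGo, pvIsNoise, List.takeWhile_cons, List.filter_cons, List.filter_nil, ih, *, Bool.false_and, Bool.and_false, Bool.true_and, Bool.and_true, Bool.false_or, Bool.or_false, Bool.true_or, Bool.or_true, Bool.not_true, Bool.not_false, Bool.false_eq_true, eq_self_iff_true, if_true, if_false]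

-- B's backward fold = (cut-then-filter) reversed: the last stub processed (the leftmost
-- stub of the list) clears the accumulator, discarding every later line.
theorem pvB_eq (ls : List String) :
    (ls.reverse).foldl pvBStep [] =
      ((ls.takeWhile (fun ln => !(PySem.Str.startswith (PySem.Str.strip ln) "Change log stub"))).filter
        (fun ln => !(pvIsNoise (PySem.Str.strip ln)))).reverse := by
  rw [List.foldl_reverse]
  induction ls with
  | nil => rfl
  | cons line rest ih =>
    simp only [List.foldr_cons, ih, List.takeWhile_cons]
    cases h1 : PySem.Str.startswith (PySem.Str.strip line) "Change log stub" with
    | true => simp only [pvBStep]; rw [h1]; simp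
    | false =>
      simp only [pvBStep]
      rw [h1]
      cases h2 : pvIsNoise (PySem.Str.strip line) with
      | true => simp [h2]
      | false => simp [h2]

-- ===== VERDICT =====
theorem strip_router_boilerplate_py_spec : Claim_equal_strip_router_boilerplate_py := by
  intro s _
  unfold Spec_strip_router_boilerplate_py strip_router_boilerplate_py strip_router_boilerplate_py_alt
  rw [pvGo_eq, pvB_eq, List.reverse_reverse]
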